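-- pv_equiv track=rewrite | github.com/jeff39389327/Pigeon | decide_card_to_play.py | apply
-- ===== SOURCE A (Python) =====
-- def apply(hand):
--     single_cards = [card for card, count in hand.items() if count == 1]
--     if single_cards:
--         return single_cards[0]
--     for card, count in hand.items():
--         if count == 2:
--             return card
--     return None
-- ===== SOURCE B (Python) =====
-- def apply(hand):
--     first_single = None
--     first_pair = None
--     for card, count in hand.items():
--         if count == 1 and first_single is None:
--             first_single = card
--         elif count == 2 and first_pair is None:
--             first_pair = card
--     return first_single if first_single is not None else first_pair
-- ===== Notes on version B (the rewrite author's own statement) =====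
-- stated objective: alternative
-- what changed: Replaced A's list-comprehension pass over all items plus a separate second scan with a single combined traversal that records the first single-count and first pair-count card in two variables and picks between them at the end.
import Mathlib
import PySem

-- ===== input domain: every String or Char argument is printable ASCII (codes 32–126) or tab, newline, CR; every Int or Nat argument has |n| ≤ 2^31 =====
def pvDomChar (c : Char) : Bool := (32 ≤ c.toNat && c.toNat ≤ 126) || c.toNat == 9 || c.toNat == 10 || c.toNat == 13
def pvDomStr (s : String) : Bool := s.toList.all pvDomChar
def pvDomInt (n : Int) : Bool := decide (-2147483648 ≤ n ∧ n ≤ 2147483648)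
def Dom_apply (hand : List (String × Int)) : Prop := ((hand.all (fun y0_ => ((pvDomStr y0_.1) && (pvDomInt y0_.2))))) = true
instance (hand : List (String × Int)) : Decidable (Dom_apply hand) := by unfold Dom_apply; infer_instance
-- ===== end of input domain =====

-- B replaces A's list-comprehension pass plus second scan with one combined traversal
-- keeping the first single-count and first pair-count candidates (objective: alternative).


-- ===== PORT A =====
-- the second scan: 'for card, count in hand.items(): if count == 2: return card'
def applyPairScan : List (String × Int) → Option String
  | [] => none
  | (card, count) :: rest => if count == 2 then some card else applyPairScan rest

def apply (hand : List (String × Int)) : Option String :=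
  let single_cards := (hand.filter (fun p => p.2 == 1)).map Prod.fst
  match single_cards with
  | c :: _ => some c
  | [] => applyPairScan hand

-- ===== PORT B =====
-- the loop body of B: fill first_single / first_pair the first time each fits
def stepB (acc : Option String × Option String) (p : String × Int) :
    Option String × Option String :=
  if p.2 == 1 && acc.1.isNone then (some p.1, acc.2)
  else if p.2 == 2 && acc.2.isNone then (acc.1, some p.1)
  else acc

def apply_alt (hand : List (String × Int)) : Option String :=
  let st := hand.foldl stepB (none, none)
  match st.1 with
  | some c => some c
  | none => st.2

-- ===== PRECONDITION & SPEC =====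
def Spec_apply (hand : List (String × Int)) (out : Option String) : Prop := out = apply_alt hand
instance (hand : List (String × Int)) (out : Option String) : Decidable (Spec_apply hand out) := by unfold Spec_apply; infer_instance

-- ===== CLAIM (what is proved, stated in full; the proofs are below) =====
def Claim_equal_apply : Prop := ∀ (hand : List (String × Int)), Dom_apply hand → Spec_apply hand (apply hand)

-- ===== LEMMAS AND PROOFS =====

-- the first single-count card, as A computes it
def firstSingle (hand : List (String × Int)) : Option String :=
  ((hand.filter (fun p => p.2 == 1)).map Prod.fst).head?

-- B's fold, from an arbitrary accumulator, fills each empty slot with the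
-- corresponding first candidate of the remaining list
theorem apply_fold_char (hand : List (String × Int)) :
    ∀ (s p : Option String),
    hand.foldl stepB (s, p)
    = (s.orElse (fun _ => firstSingle hand), p.orElse (fun _ => applyPairScan hand)) := by
  induction hand with
  | nil => intro s p; cases s <;> cases p <;> simp [Option.orElse, firstSingle, applyPairScan]
  | cons q rest ih =>
    intro s p
    rw [List.foldl_cons]
    by_cases h1 : q.2 = 1 ∧ s = none
    · rw [show stepB (s, p) q = (some q.1, p) from by simp [stepB, h1.1, h1.2], ih]
      simp [h1.1, h1.2, firstSingle, applyPairScan, Option.orElse]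
    · by_cases h2 : q.2 = 2 ∧ p = none
      · have b1 : ¬ ((q.2 == 1 && s.isNone) = true) := by simp [h2.1]
        have bp : (q.2 == 2 && p.isNone) = true := by simp [h2.1, h2.2]
        rw [show stepB (s, p) q = (s, some q.1) from by
          simp only [stepB]; rw [if_neg b1, if_pos bp], ih]
        cases s <;>
          simp [h2.1, h2.2, firstSingle, applyPairScan, Option.orElse]
      · have b1 : ¬ ((q.2 == 1 && s.isNone) = true) := by
          simp only [Bool.and_eq_true, beq_iff_eq, Option.isNone_iff_eq_none]
          exact h1
        have b2 : ¬ ((q.2 == 2 && p.isNone) = true) := by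
          simp only [Bool.and_eq_true, beq_iff_eq, Option.isNone_iff_eq_none]
          exact h2
        rw [show stepB (s, p) q = (s, p) from by
          simp only [stepB]; rw [if_neg b1, if_neg b2], ih]
        push Not at h1 h2
        cases s <;> cases p <;>
          simp_all [firstSingle, applyPairScan, Option.orElse]

-- ===== VERDICT (by name: the statement is the Claim_ definition above) =====
theorem apply_spec : Claim_equal_apply := by
  intro hand _
  unfold Spec_apply apply apply_alt
  rw [apply_fold_char hand none none]
  simp only [Option.orElse]
  unfold firstSingle
  cases h : (hand.filter (fun p => p.2 == 1)).map Prod.fst <;> simp_all
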